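-- pv_equiv track=rewrite | github.com/AQUA-32763/Transformer-25120427 | Final_Transformer.py | word2id
-- ===== SOURCE A (Python) =====
-- UNK = 1  # 未登录词标识符的索引
--
-- def word2id(en, cn, en_dict, cn_dict, sort=True):
--     length = len(en)
--     out_en_ids = [[en_dict.get(word, UNK) for word in sent] for sent in en]
--     out_cn_ids = [[cn_dict.get(word, UNK) for word in sent] for sent in cn]
--
--     def len_argsort(seq):
--         return sorted(range(len(seq)), key=lambda x: len(seq[x]))
--
--     if sort:
--         sorted_index = len_argsort(out_en_ids)
--         out_en_ids = [out_en_ids[idx] for idx in sorted_index]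
--         out_cn_ids = [out_cn_ids[idx] for idx in sorted_index]
--     return out_en_ids, out_cn_ids
-- ===== SOURCE B (Python) =====
-- UNK = 1
--
-- def word2id(en, cn, en_dict, cn_dict, sort=True):
--     out_en_ids = [[en_dict.get(word, UNK) for word in sent] for sent in en]
--     out_cn_ids = [[cn_dict.get(word, UNK) for word in sent] for sent in cn]
--     if sort:
--         # stable counting/bucket sort keyed on sentence length
--         maxlen = 0
--         for s in out_en_ids:
--             if len(s) > maxlen:
--                 maxlen = len(s)
--         buckets = [[] for _ in range(maxlen + 1)]
--         for pair in zip(out_en_ids, out_cn_ids):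
--             buckets[len(pair[0])].append(pair)
--         out_en_ids, out_cn_ids = [], []
--         for b in buckets:
--             for e, c in b:
--                 out_en_ids.append(e)
--                 out_cn_ids.append(c)
--     return out_en_ids, out_cn_ids
-- ===== Notes on version B (the rewrite author's own statement) =====
-- stated objective: alternative
-- what changed: B replaces A's comparison argsort (sorted(range(n), key=len) plus two gather passes) with a stable counting/bucket sort: sentence pairs are dropped into length-indexed buckets and concatenated in increasing length order (same value; not measurably faster since the id-mapping passes dominate).
import Mathlib
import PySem

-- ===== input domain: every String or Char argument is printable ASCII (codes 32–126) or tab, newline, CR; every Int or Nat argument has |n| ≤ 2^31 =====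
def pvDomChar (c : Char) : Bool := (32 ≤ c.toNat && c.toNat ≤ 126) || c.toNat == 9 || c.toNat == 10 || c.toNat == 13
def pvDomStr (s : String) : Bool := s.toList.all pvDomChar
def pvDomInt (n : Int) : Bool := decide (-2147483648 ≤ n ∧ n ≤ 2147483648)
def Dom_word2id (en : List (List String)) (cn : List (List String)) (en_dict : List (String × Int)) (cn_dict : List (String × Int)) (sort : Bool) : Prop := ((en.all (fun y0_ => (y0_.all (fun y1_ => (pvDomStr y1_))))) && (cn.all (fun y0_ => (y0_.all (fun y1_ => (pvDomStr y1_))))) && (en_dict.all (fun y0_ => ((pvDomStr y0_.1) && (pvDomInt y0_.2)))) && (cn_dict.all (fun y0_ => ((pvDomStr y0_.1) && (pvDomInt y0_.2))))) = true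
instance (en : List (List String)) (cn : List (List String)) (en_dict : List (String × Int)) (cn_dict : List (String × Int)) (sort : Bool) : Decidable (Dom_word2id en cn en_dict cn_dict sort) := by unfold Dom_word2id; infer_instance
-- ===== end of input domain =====

-- B replaces A's comparison argsort (sorted(range(n), key=len) + two gathers) by a stable
-- counting/bucket sort on sentence length; equal return values proved on Pre_ below.

-- ===== PORT A =====
def word2id (en : List (List String)) (cn : List (List String)) (en_dict : List (String × Int)) (cn_dict : List (String × Int)) (sort : Bool) : List (List Int) × List (List Int) :=
  -- out_en_ids / out_cn_ids: dict.get(word, UNK) with UNK = 1 (first-match association-list lookup)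
  let out_en_ids := en.map (fun sent => sent.map (fun word => PySem.Dict.getD (PySem.Dict.mk en_dict) word 1))
  let out_cn_ids := cn.map (fun sent => sent.map (fun word => PySem.Dict.getD (PySem.Dict.mk cn_dict) word 1))
  if sort then
    -- len_argsort: sorted(range(len(seq)), key=lambda x: len(seq[x])); every x is in range,
    -- so the `.getD []` totalisation of seq[x] is exact here
    let sorted_index := PySem.List.sorted (PySem.List.pyRange 0 (out_en_ids.length : Int) 1)
      (fun x => (((PySem.List.pyGet? out_en_ids x).getD []).length : Int))
    -- out_cn_ids[idx] is an IndexError when idx ≥ len(cn): exactly those inputs are excluded by Pre_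
    (sorted_index.map (fun idx => (PySem.List.pyGet? out_en_ids idx).getD []),
     sorted_index.map (fun idx => (PySem.List.pyGet? out_cn_ids idx).getD []))
  else
    (out_en_ids, out_cn_ids)

-- ===== PORT B =====
def word2id_alt (en : List (List String)) (cn : List (List String)) (en_dict : List (String × Int)) (cn_dict : List (String × Int)) (sort : Bool) : List (List Int) × List (List Int) :=
  let out_en_ids := en.map (fun sent => sent.map (fun word => PySem.Dict.getD (PySem.Dict.mk en_dict) word 1))
  let out_cn_ids := cn.map (fun sent => sent.map (fun word => PySem.Dict.getD (PySem.Dict.mk cn_dict) word 1))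
  if sort then
    -- maxlen running maximum
    let maxlen := out_en_ids.foldl (fun m s => if s.length > m then s.length else m) 0
    -- buckets[len(e)].append((e, c)) over zip(out_en_ids, out_cn_ids)
    let buckets := (out_en_ids.zip out_cn_ids).foldl
      (fun bs p => bs.set p.1.length ((bs.getD p.1.length []) ++ [p]))
      (List.replicate (maxlen + 1) ([] : List (List Int × List Int)))
    -- concatenate buckets in increasing length order, appending e and c separately
    buckets.foldl (fun acc b => b.foldl (fun a2 p => (a2.1 ++ [p.1], a2.2 ++ [p.2])) acc)
      (([], []) : List (List Int) × List (List Int))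
  else
    (out_en_ids, out_cn_ids)

-- ===== PRECONDITION & SPEC =====
-- A raises IndexError iff sort is true, en is nonempty and cn is shorter than en
-- (len_argsort's indices run over en but are applied to out_cn_ids); exactly that is excluded.
def Pre_word2id (en : List (List String)) (cn : List (List String)) (en_dict : List (String × Int)) (cn_dict : List (String × Int)) (sort : Bool) : Prop :=
  sort = true → (en = [] ∨ en.length ≤ cn.length)
instance (en : List (List String)) (cn : List (List String)) (en_dict : List (String × Int)) (cn_dict : List (String × Int)) (sort : Bool) : Decidable (Pre_word2id en cn en_dict cn_dict sort) := by unfold Pre_word2id; infer_instance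

def pvWitness_word2id : List (List String) × List (List String) × (List (String × Int)) × (List (String × Int)) × Bool :=
  ([["a", "b"], ["c"]], [["x"], ["y", "z"]], [("a", 3)], [("x", 5)], true)

def Spec_word2id (en : List (List String)) (cn : List (List String)) (en_dict : List (String × Int)) (cn_dict : List (String × Int)) (sort : Bool) (out : List (List Int) × List (List Int)) : Prop := out = word2id_alt en cn en_dict cn_dict sort
instance (en : List (List String)) (cn : List (List String)) (en_dict : List (String × Int)) (cn_dict : List (String × Int)) (sort : Bool) (out : List (List Int) × List (List Int)) : Decidable (Spec_word2id en cn en_dict cn_dict sort out) := by unfold Spec_word2id; infer_instance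

-- ===== CLAIM (what is proved, stated in full; the proofs are below) =====
def Claim_equal_word2id : Prop := ∀ (en : List (List String)) (cn : List (List String)) (en_dict : List (String × Int)) (cn_dict : List (String × Int)) (sort : Bool), Dom_word2id en cn en_dict cn_dict sort → Pre_word2id en cn en_dict cn_dict sort → Spec_word2id en cn en_dict cn_dict sort (word2id en cn en_dict cn_dict sort)


-- ===== LEMMAS AND PROOFS =====

-- insertBy passes over a block it is not inserted before
theorem insertBy_append_of_forall_not {α : Type} (before : α → α → Bool) (x : α) (b r : List α)
    (h : ∀ z ∈ b, before x z = false) :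
    PySem.List.insertBy before x (b ++ r) = b ++ PySem.List.insertBy before x r := by
  induction b with
  | nil => rfl
  | cons z b ih =>
    simp only [List.cons_append, PySem.List.insertBy, h z (by simp)]
    simp only [Bool.false_eq_true, if_false, List.cons.injEq, true_and]
    exact ih (fun z hz => h z (by simp [hz]))

-- insertBy goes to the front of a block it precedes entirely
theorem insertBy_cons_of_forall_before {α : Type} (before : α → α → Bool) (x : α) (r : List α)
    (h : ∀ z ∈ r, before x z = true) :
    PySem.List.insertBy before x r = x :: r := by
  cases r with
  | nil => rfl
  | cons z r => simp only [PySem.List.insertBy, h z (by simp), if_true]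

-- STABILITY (grouping) step: inserting x into the concatenation of the per-level groups
-- appends it at the end of its own level's group
theorem insertBy_flatten_groups {α : Type} (key : α → Nat) (x : α) (xs : List α) :
    ∀ (ls : List Nat), ls.Pairwise (· < ·) → key x ∈ ls →
    PySem.List.insertBy (fun a b => decide (key a < key b)) x
        ((ls.map (fun l => xs.filter (fun y => decide (key y = l)))).flatten)
      = (ls.map (fun l => xs.filter (fun y => decide (key y = l)) ++ if key x = l then [x] else [])).flatten := by
  intro ls hpw hmem
  induction ls with
  | nil => simp at hmem
  | cons l ls ih =>
    have hlt : ∀ l' ∈ ls, l < l' := (List.pairwise_cons.mp hpw).1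
    have hb : ∀ z ∈ xs.filter (fun y => decide (key y = l)), key z = l := by
      intro z hz; simpa using (List.of_mem_filter hz)
    by_cases hx : key x = l
    · -- x lands at the end of the l-group; the later groups are untouched
      have hnotmem : key x ∉ ls := fun h => absurd (hlt _ h) (by omega)
      have hrest : ∀ z ∈ (ls.map (fun l' => xs.filter (fun y => decide (key y = l')))).flatten,
          (fun a b => decide (key a < key b)) x z = true := by
        intro z hz
        obtain ⟨g, hg, hzg⟩ := List.mem_flatten.mp hz
        obtain ⟨l', hl', rfl⟩ := List.mem_map.mp hg
        have := List.of_mem_filter hzg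
        simp only [decide_eq_true_eq] at this ⊢
        have := hlt l' hl'; omega
      rw [List.map_cons, List.flatten_cons,
        insertBy_append_of_forall_not _ _ _ _ (by
          intro z hz; have := hb z hz; simp only [decide_eq_false_iff_not]; omega),
        insertBy_cons_of_forall_before _ _ _ hrest,
        List.map_cons, List.flatten_cons, if_pos hx]
      have : (ls.map (fun l' => xs.filter (fun y => decide (key y = l')) ++ if key x = l' then [x] else []))
           = ls.map (fun l' => xs.filter (fun y => decide (key y = l'))) := by
        apply List.map_congr_left; intro l' hl'
        rw [if_neg (by intro hh; exact hnotmem (hh ▸ hl'))]; simp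
      rw [this]; simp
    · -- x belongs to a later group: pass over the l-group and recurse
      have hmem' : key x ∈ ls := by exact (List.mem_cons.mp hmem).resolve_left hx
      have hgt : l < key x := hlt _ hmem'
      rw [List.map_cons, List.flatten_cons,
        insertBy_append_of_forall_not _ _ _ _ (by
          intro z hz; have := hb z hz; simp only [decide_eq_false_iff_not]; omega),
        ih (List.pairwise_cons.mp hpw).2 hmem',
        List.map_cons, List.flatten_cons, if_neg hx]
      simp

-- STABILITY: a stable sort by a Nat key is the concatenation of the per-level filters
theorem sorted_eq_flatten_groups {α : Type} (key : α → Nat) (m : Nat) :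
    ∀ (xs : List α), (∀ y ∈ xs, key y ≤ m) →
    PySem.List.sorted xs key
      = ((List.range (m + 1)).map (fun l => xs.filter (fun y => decide (key y = l)))).flatten := by
  intro xs
  induction xs using List.reverseRecOn with
  | nil => intro _; simp [PySem.List.sorted_eq_foldl_insertBy]
  | append_singleton xs x ih =>
    intro hbound
    have hx : key x ≤ m := hbound x (by simp)
    rw [PySem.List.sorted_eq_foldl_insertBy, List.foldl_append, List.foldl_cons, List.foldl_nil,
      ← PySem.List.sorted_eq_foldl_insertBy,
      ih (fun y hy => hbound y (by simp [hy])),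
      insertBy_flatten_groups key x xs (List.range (m + 1)) (List.pairwise_lt_range)
        (by simp; omega)]
    congr 1
    apply List.map_congr_left
    intro l _
    rw [List.filter_append]
    congr 1
    by_cases h : key x = l <;> simp [h]

-- Int-cast of a Nat key does not change sorted
theorem sorted_intCast_key {α : Type} (xs : List α) (key : α → Nat) :
    PySem.List.sorted xs (fun a => ((key a : Nat) : Int)) = PySem.List.sorted xs key := by
  rw [PySem.List.sorted_eq_foldl_insertBy, PySem.List.sorted_eq_foldl_insertBy]
  congr 1
  funext acc a
  congr 1
  funext p q
  simp

-- the running-maximum loop of B is foldl max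
theorem ite_fold_eq_foldl_max (xs : List (List Int)) :
    xs.foldl (fun m2 s => if s.length > m2 then s.length else m2) 0
      = xs.foldl (fun m s => max m s.length) 0 := by
  congr 1
  funext m s
  split_ifs with h <;> omega

-- B's bucket loop builds exactly the per-level filters
theorem bucket_fold_eq_groups {β : Type} (f : β → Nat) (m : Nat) :
    ∀ (ps qs : List β), (∀ p ∈ ps, f p ≤ m) →
    ps.foldl (fun bs p => bs.set (f p) ((bs.getD (f p) []) ++ [p]))
        ((List.range (m + 1)).map (fun l => qs.filter (fun y => decide (f y = l))))
      = (List.range (m + 1)).map (fun l => (qs ++ ps).filter (fun y => decide (f y = l))) := by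
  intro ps
  induction ps with
  | nil => intro qs _; simp
  | cons p ps ih =>
    intro qs hb
    have hp : f p ≤ m := hb p (by simp)
    have hstep : ((List.range (m + 1)).map (fun l => qs.filter (fun y => decide (f y = l)))).set (f p)
          ((((List.range (m + 1)).map (fun l => qs.filter (fun y => decide (f y = l)))).getD (f p) []) ++ [p])
        = (List.range (m + 1)).map (fun l => (qs ++ [p]).filter (fun y => decide (f y = l))) := by
      apply List.ext_getElem
      · simp
      · intro j hj hj'
        simp only [List.length_set, List.length_map, List.length_range] at hj
        rw [List.getElem_set]
        have hget : (((List.range (m + 1)).map (fun l => qs.filter (fun y => decide (f y = l)))).getD (f p) [])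
            = qs.filter (fun y => decide (f y = f p)) := by
          rw [List.getD_eq_getElem _ _ (by simp; omega)]
          simp
        by_cases hjp : f p = j
        · rw [if_pos hjp, hget]
          simp only [List.getElem_map, List.getElem_range, List.filter_append]
          subst hjp
          simp
        · rw [if_neg hjp]
          simp only [List.getElem_map, List.getElem_range, List.filter_append]
          have : [p].filter (fun y => decide (f y = j)) = [] := by
            simp; omega
          rw [this, List.append_nil]
    rw [List.foldl_cons, hstep, ih (qs ++ [p]) (fun x hx => hb x (by simp [hx]))]
    simp

-- B's output loop: appending e and c separately unzips the flattened buckets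
theorem inner_unzip_fold {γ δ : Type} (b : List (γ × δ)) :
    ∀ (acc : List γ × List δ),
    b.foldl (fun a2 p => (a2.1 ++ [p.1], a2.2 ++ [p.2])) acc
      = (acc.1 ++ b.map Prod.fst, acc.2 ++ b.map Prod.snd) := by
  induction b with
  | nil => intro acc; simp
  | cons p b ih => intro acc; rw [List.foldl_cons, ih]; simp

theorem outer_unzip_fold {γ δ : Type} (L : List (List (γ × δ))) :
    ∀ (acc : List γ × List δ),
    L.foldl (fun acc b => b.foldl (fun a2 p => (a2.1 ++ [p.1], a2.2 ++ [p.2])) acc) acc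
      = (acc.1 ++ L.flatten.map Prod.fst, acc.2 ++ L.flatten.map Prod.snd) := by
  induction L with
  | nil => intro acc; simp
  | cons b L ih =>
    intro acc
    rw [List.foldl_cons, inner_unzip_fold, ih]
    simp

-- zip as a map over the index range (when the second list is at least as long)
theorem zip_eq_map_pyRange {γ δ : Type} (xs : List γ) (ys : List δ) (dx : γ) (dy : δ)
    (h : xs.length ≤ ys.length) :
    (PySem.List.pyRange 0 (xs.length : Int) 1).map
        (fun i => ((PySem.List.pyGet? xs i).getD dx, (PySem.List.pyGet? ys i).getD dy))
      = xs.zip ys := by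
  apply List.ext_getElem
  · simp [PySem.List.length_pyRange_one]; omega
  · intro k hk hk'
    simp only [List.getElem_map, PySem.List.getElem_pyRange_one, zero_add]
    have h2 : k < xs.length ∧ k < ys.length := by simpa using hk'
    have hkx := h2.1
    have hky := h2.2
    rw [List.getElem_zip]
    rw [PySem.List.pyGet?_natCast, PySem.List.pyGet?_natCast,
      List.getElem?_eq_getElem hkx, List.getElem?_eq_getElem hky]
    rfl

-- ===== VERDICT (by name: the statement is the Claim_ definition above) =====
theorem word2id_spec : Claim_equal_word2id := by
  intro en cn en_dict cn_dict sort _ hpre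
  unfold Spec_word2id
  cases sort with
  | false => simp [word2id, word2id_alt]
  | true =>
    rcases hpre rfl with rfl | hlen
    · -- en = []: both sides are ([], [])
      simp [word2id, word2id_alt, PySem.List.sorted_eq_foldl_insertBy,
        PySem.List.pyRange_one_eq_nil]
    · simp only [word2id, word2id_alt, if_true]
      set oe := en.map (fun sent => sent.map (fun word => PySem.Dict.getD (PySem.Dict.mk en_dict) word 1)) with hoe
      set oc := cn.map (fun sent => sent.map (fun word => PySem.Dict.getD (PySem.Dict.mk cn_dict) word 1)) with hoc
      have hlen2 : oe.length ≤ oc.length := by simpa [hoe, hoc] using hlen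
      rw [ite_fold_eq_foldl_max]
      set m := oe.foldl (fun m s => max m s.length) 0 with hm
      have hbound : ∀ s ∈ oe, s.length ≤ m := (PySem.List.le_foldl_max_nat oe (fun s => s.length) 0).2
      have hidx : ∀ i ∈ PySem.List.pyRange 0 (oe.length : Int) 1,
          ((PySem.List.pyGet? oe i).getD []).length ≤ m := by
        intro i hi
        obtain ⟨h0, h1⟩ := PySem.List.mem_pyRange_one.mp hi
        rw [PySem.List.pyGet?_eq_some_getElem oe h0 h1]
        exact hbound _ (List.getElem_mem _)
      rw [sorted_intCast_key, sorted_eq_flatten_groups _ m _ hidx]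
      rw [← zip_eq_map_pyRange oe oc [] [] hlen2]
      have hinit : List.replicate (m + 1) ([] : List (List Int × List Int))
          = (List.range (m + 1)).map
              (fun l => (([] : List (List Int × List Int)).filter (fun y => decide (y.1.length = l)))) := by
        simp
      rw [hinit, bucket_fold_eq_groups (fun (p : List Int × List Int) => p.1.length) m _ [] (by
        intro p hp
        obtain ⟨i, hi, rfl⟩ := List.mem_map.mp hp
        exact hidx i hi)]
      rw [outer_unzip_fold]
      simp only [List.nil_append, List.map_flatten, List.filter_map, List.map_map,
        Function.comp_def]
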